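-- pv_equiv track=rewrite | github.com/luca-venturi/bbald_test | src/dataset_enum.py | pick_dataset_indices_balanced
-- ===== SOURCE A (Python) =====
-- def pick_dataset_indices_balanced(classes, labels, n):
--
-- 	classes_idx = {c:[] for c in classes}
-- 	for i,y in enumerate(labels):
-- 		if y in classes: classes_idx[y].append(i)
--
-- 	n = min( n // len(classes), min([len(classes_idx[c]) for c in classes]) )
--
-- 	indices = []
-- 	for c in classes:
-- 		indices = indices + classes_idx[c][:n]
-- 	return indices
-- ===== SOURCE B (Python) =====
-- def pick_dataset_indices_balanced(classes, labels, n):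
-- 	per_class = [[i for i, y in enumerate(labels) if y == c] for c in classes]
-- 	n = min(n // len(classes), min(len(idx) for idx in per_class))
-- 	out = []
-- 	for idx in per_class:
-- 		out += idx[:n]
-- 	return out
-- ===== Notes on version B (the rewrite author's own statement) =====
-- stated objective: simpler
-- what changed: Replaces the membership-guarded dict dispatch pass (build empty buckets keyed by class, route each label through the dict, then slice via lookups) with direct per-class scans of the labels: a comprehension builds each class's index list by filtering enumerate(labels), so the dict and the 'y in classes' test disappear.
import Mathlib
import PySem

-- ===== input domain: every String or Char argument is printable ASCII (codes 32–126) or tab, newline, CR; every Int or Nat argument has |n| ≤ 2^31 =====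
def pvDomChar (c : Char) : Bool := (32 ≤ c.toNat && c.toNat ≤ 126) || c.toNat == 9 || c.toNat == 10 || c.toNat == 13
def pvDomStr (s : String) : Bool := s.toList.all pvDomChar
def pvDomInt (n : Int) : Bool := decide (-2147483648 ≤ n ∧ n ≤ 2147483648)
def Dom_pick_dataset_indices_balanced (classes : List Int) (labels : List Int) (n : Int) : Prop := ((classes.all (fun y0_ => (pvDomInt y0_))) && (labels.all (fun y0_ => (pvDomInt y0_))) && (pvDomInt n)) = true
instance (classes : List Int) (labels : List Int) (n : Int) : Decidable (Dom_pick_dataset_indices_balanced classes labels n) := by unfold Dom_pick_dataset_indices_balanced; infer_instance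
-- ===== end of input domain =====

-- B drops A's dict-dispatch pass in favour of direct per-class scans of labels (same cost, simpler); return values agree wherever A returns.

-- ===== PORT A =====
-- classes_idx = {c:[] for c in classes}; for i,y in enumerate(labels): if y in classes: classes_idx[y].append(i)
def pvA_dict (classes : List Int) (labels : List Int) : PySem.Dict Int (List Int) :=
  (PySem.List.enumerate labels 0).foldl
    (fun d p => if classes.contains p.2 then d.modify p.2 [] (fun l => l ++ [p.1]) else d)
    (classes.foldl (fun d c => d.insert c ([] : List Int)) PySem.Dict.empty)

def pick_dataset_indices_balanced (classes : List Int) (labels : List Int) (n : Int) : List Int :=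
  let d := pvA_dict classes labels
  -- n = min( n // len(classes), min([len(classes_idx[c]) for c in classes]) )
  let lens := classes.map (fun c => ((d.getD c []).length : Int))
  -- min([...]) raises only when classes = [] (excluded by Pre_, where Python already raised ZeroDivisionError); .getD 0 is the totality default
  let n' := min (PySem.Int.floordiv n classes.length) ((PySem.List.min? lens (fun y => y)).getD 0)
  -- indices = []; for c in classes: indices = indices + classes_idx[c][:n]
  classes.foldl (fun acc c => acc ++ PySem.List.slice (d.getD c []) none (some n')) []

-- ===== PORT B =====
-- per_class = [[i for i,y in enumerate(labels) if y == c] for c in classes]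
def pvB_per (classes : List Int) (labels : List Int) : List (List Int) :=
  classes.map (fun c => ((PySem.List.enumerate labels 0).filter (fun p => p.2 == c)).map (fun p => p.1))

def pick_dataset_indices_balanced_alt (classes : List Int) (labels : List Int) (n : Int) : List Int :=
  let per := pvB_per classes labels
  -- n = min(n // len(classes), min(len(idx) for idx in per_class))
  let n' := min (PySem.Int.floordiv n classes.length)
      ((PySem.List.min? (per.map (fun idx => (idx.length : Int))) (fun y => y)).getD 0)
  -- out = []; for idx in per_class: out += idx[:n]
  per.foldl (fun acc idx => acc ++ PySem.List.slice idx none (some n')) []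

-- ===== PRECONDITION & SPEC =====
-- Pre_ excludes exactly classes = [], where Python A raises ZeroDivisionError (B raises it too).
def Pre_pick_dataset_indices_balanced (classes : List Int) (labels : List Int) (n : Int) : Prop := classes ≠ []
instance (classes : List Int) (labels : List Int) (n : Int) : Decidable (Pre_pick_dataset_indices_balanced classes labels n) := by unfold Pre_pick_dataset_indices_balanced; infer_instance
def pvWitness_pick_dataset_indices_balanced : List Int × List Int × Int := ([1, 2], [1, 2, 1, 2, 1], 6)

def Spec_pick_dataset_indices_balanced (classes : List Int) (labels : List Int) (n : Int) (out : List Int) : Prop := out = pick_dataset_indices_balanced_alt classes labels n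
instance (classes : List Int) (labels : List Int) (n : Int) (out : List Int) : Decidable (Spec_pick_dataset_indices_balanced classes labels n out) := by unfold Spec_pick_dataset_indices_balanced; infer_instance

-- ===== CLAIM (what is proved, stated in full; the proofs are below) =====
def Claim_equal_pick_dataset_indices_balanced : Prop := ∀ (classes : List Int) (labels : List Int) (n : Int), Dom_pick_dataset_indices_balanced classes labels n → Pre_pick_dataset_indices_balanced classes labels n → Spec_pick_dataset_indices_balanced classes labels n (pick_dataset_indices_balanced classes labels n)

-- ===== LEMMAS AND PROOFS =====

-- every bucket of the initial dict {c:[] for c in classes} is []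
theorem pv_getD_init (cs : List Int) (d : PySem.Dict Int (List Int))
    (h : ∀ k, d.getD k ([] : List Int) = []) (c : Int) :
    (cs.foldl (fun d c => d.insert c ([] : List Int)) d).getD c [] = [] := by
  induction cs generalizing d with
  | nil => exact h c
  | cons x xs ih =>
      refine ih _ (fun k => ?_) 
      rw [PySem.Dict.getD_insert]
      split <;> simp [h]

-- after the dispatch loop, bucket c (for c ∈ classes) is exactly the filtered index list B builds
theorem pv_bucket (classes labels : List Int) (c : Int) (hc : c ∈ classes) :
    (pvA_dict classes labels).getD c []
      = ((PySem.List.enumerate labels 0).filter (fun p => p.2 == c)).map (fun p => p.1) := by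
  unfold pvA_dict
  rw [← List.foldl_filter]
  have hmap : ((PySem.List.enumerate labels 0).filter (fun p => classes.contains p.2)).foldl
      (fun d (p : Int × Int) => d.modify p.2 [] (fun l => l ++ [p.1]))
      (classes.foldl (fun d c => d.insert c ([] : List Int)) PySem.Dict.empty)
      = (((PySem.List.enumerate labels 0).filter (fun p => classes.contains p.2)).map
          (fun p => (p.2, p.1))).foldl
        (fun d (p : Int × Int) => d.modify p.1 [] (fun l => l ++ [p.2]))
        (classes.foldl (fun d c => d.insert c ([] : List Int)) PySem.Dict.empty) := by
    rw [List.foldl_map]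
  rw [hmap, PySem.Dict.getD_foldl_modify_append,
      pv_getD_init classes _ (fun k => by simp [PySem.Dict.getD_empty]) c]
  simp only [List.nil_append, List.filter_map, List.map_map]
  rw [List.filter_filter]
  congr 1
  apply List.filter_congr
  intro p _
  simp only [Function.comp]
  by_cases h : p.2 = c
  · simp [h, hc]
  · simp [h]

theorem pv_glue (cs : List Int) (g f : Int → List Int) (q : Int)
    (h : ∀ c ∈ cs, g c = f c) :
    (cs.foldl (fun acc c => acc ++ PySem.List.slice (g c) none
        (some (min q ((PySem.List.min? (cs.map (fun c => ((g c).length : Int))) (fun y => y)).getD 0)))) [])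
    = ((cs.map f).foldl (fun acc idx => acc ++ PySem.List.slice idx none
        (some (min q ((PySem.List.min? ((cs.map f).map (fun idx => (idx.length : Int))) (fun y => y)).getD 0)))) []) := by
  rw [List.foldl_map, List.map_map]
  have h1 : cs.map (fun c => ((g c).length : Int))
      = cs.map ((fun idx => ((idx.length : Int))) ∘ f) :=
    List.map_congr_left fun c hc => by simp [Function.comp, h c hc]
  rw [h1]
  exact PySem.List.foldl_congr_mem _ _ _ _ (fun acc c hc => by rw [h c hc])

theorem pick_helper (classes labels : List Int) (n : Int) :
    pick_dataset_indices_balanced classes labels n = pick_dataset_indices_balanced_alt classes labels n := by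
  unfold pick_dataset_indices_balanced pick_dataset_indices_balanced_alt pvB_per
  apply pv_glue classes
    (fun c => (pvA_dict classes labels).getD c [])
    (fun c => ((PySem.List.enumerate labels 0).filter (fun p => p.2 == c)).map (fun p => p.1))
    (PySem.Int.floordiv n classes.length)
    (pv_bucket classes labels)

-- ===== VERDICT (by name: the statement is the Claim_ definition above) =====
theorem pick_dataset_indices_balanced_spec : Claim_equal_pick_dataset_indices_balanced := by
  intro classes labels n _ _
  unfold Spec_pick_dataset_indices_balanced
  exact pick_helper classes labels n
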